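-- pv_equiv track=rewrite | github.com/katarinasupe/aoc | 2022/day-5/utility.py | solve
-- ===== SOURCE A (Python) =====
-- from itertools import groupby
--
-- def solve(seq):
--     for k, g in groupby(seq):
--         length = sum(1 for _ in g)
--         if k == "":
--             for i in range(0, int(length / 4)):
--                 yield ""
--         else:
--             for i in range(0, length):
--                 yield k
-- ===== SOURCE B (Python) =====
-- def solve(seq):
--     empties = 0
--     for x in seq:
--         if x == "":
--             empties += 1
--         else:
--             for _ in range(empties // 4):
--                 yield ""
--             empties = 0
--             yield x
--     for _ in range(empties // 4):
--         yield ""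
-- ===== Notes on version B (the rewrite author's own statement) =====
-- stated objective: simpler
-- what changed: Replaces itertools.groupby plus per-group counting with a single pass that keeps only an integer counter of consecutive empty strings, flushing counter//4 empties before each non-empty element (which is re-emitted directly) and once at the end.
import Mathlib
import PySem

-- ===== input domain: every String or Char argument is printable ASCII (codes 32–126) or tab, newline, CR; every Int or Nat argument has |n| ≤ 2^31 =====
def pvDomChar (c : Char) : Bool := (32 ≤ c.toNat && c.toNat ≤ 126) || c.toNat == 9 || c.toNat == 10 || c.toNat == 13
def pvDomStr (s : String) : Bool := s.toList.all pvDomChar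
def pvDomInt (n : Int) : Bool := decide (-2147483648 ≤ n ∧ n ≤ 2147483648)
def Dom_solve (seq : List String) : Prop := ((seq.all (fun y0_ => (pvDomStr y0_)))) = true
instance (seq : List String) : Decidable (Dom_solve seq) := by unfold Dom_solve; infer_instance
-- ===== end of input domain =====

-- ===== PORT A =====
-- groupby over seq: successive runs of equal elements; for an empty-string run of
-- length L emit L/4 empty strings, for a non-empty run re-emit it entirely.
def solve (seq : List String) : List String :=
  match seq with
  | [] => []
  | x :: xs =>
    let run := xs.takeWhile (· = x)
    let rest := xs.dropWhile (· = x)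
    let length := run.length + 1
    (if x = "" then List.replicate (length / 4) "" else List.replicate length x)
      ++ solve rest
termination_by seq.length
decreasing_by
  simp only [List.length_cons]
  exact Nat.lt_succ_of_le (List.length_dropWhile_le _ _)

-- ===== PORT B =====
-- single pass keeping a counter of consecutive "" seen; each non-empty element is
-- re-emitted directly, preceded by counter/4 empty strings; final flush at the end.
def solveAltGo (seq : List String) (empties : Nat) : List String :=
  match seq with
  | [] => List.replicate (empties / 4) ""
  | x :: xs =>
    if x = "" then solveAltGo xs (empties + 1)
    else List.replicate (empties / 4) "" ++ x :: solveAltGo xs 0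

def solve_alt (seq : List String) : List String := solveAltGo seq 0

-- ===== PRECONDITION & SPEC =====
def Spec_solve (seq : List String) (out : List String) : Prop := out = solve_alt seq
instance (seq : List String) (out : List String) : Decidable (Spec_solve seq out) := by unfold Spec_solve; infer_instance

-- ===== CLAIM (what is proved, stated in full; the proofs are below) =====
def Claim_equal_solve : Prop := ∀ (seq : List String), Dom_solve seq → Spec_solve seq (solve seq)

-- ===== LEMMAS AND PROOFS =====

-- ===== VERDICT (by name: the statement is the Claim_ definition above) =====
-- flushing behaviour of the counter over a block of empty strings
theorem go_replicate_empty (n : Nat) (rest : List String) (c : Nat) :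
    solveAltGo (List.replicate n "" ++ rest) c = solveAltGo rest (c + n) := by
  induction n generalizing c with
  | zero => simp
  | succ k ih =>
    simp [List.replicate_succ, solveAltGo, ih, Nat.add_comm, Nat.add_left_comm]

-- a block of non-empty equal elements is re-emitted verbatim
theorem go_replicate_nonempty (n : Nat) (x : String) (hx : x ≠ "") (rest : List String) :
    solveAltGo (List.replicate n x ++ rest) 0 = List.replicate n x ++ solveAltGo rest 0 := by
  induction n with
  | zero => simp
  | succ k ih => simp [List.replicate_succ, solveAltGo, hx, ih]

-- restarting with a non-empty head (or at the end) equals flushing the counter first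
theorem go_flush (xs : List String) (c : Nat)
    (h : xs = [] ∨ ∃ y ys, xs = y :: ys ∧ y ≠ "") :
    solveAltGo xs c = List.replicate (c / 4) "" ++ solveAltGo xs 0 := by
  rcases h with h | ⟨y, ys, rfl, hy⟩
  · simp [h, solveAltGo]
  · simp [solveAltGo, hy]

theorem takeWhile_eq_replicate (x : String) (xs : List String) :
    xs.takeWhile (· = x) = List.replicate (xs.takeWhile (· = x)).length x := by
  induction xs with
  | nil => simp
  | cons y ys ih =>
    by_cases h : y = x
    · subst h
      rw [List.takeWhile_cons_of_pos (by simp)]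
      simp only [List.length_cons, List.replicate_succ]
      exact congrArg _ ih
    · rw [List.takeWhile_cons_of_neg (by simp [h])]; simp

theorem dropWhile_head (x : String) (xs : List String) :
    xs.dropWhile (· = x) = [] ∨
      ∃ y ys, xs.dropWhile (· = x) = y :: ys ∧ y ≠ x := by
  induction xs with
  | nil => simp
  | cons z zs ih =>
    by_cases h : z = x
    · simpa [List.dropWhile_cons, h] using ih
    · exact Or.inr ⟨z, zs, by simp [h], h⟩

theorem solve_eq_go (seq : List String) : solve seq = solveAltGo seq 0 := by
  induction seq using solve.induct with
  | case1 => simp [solve, solveAltGo]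
  | case2 x xs rest ih =>
    set run := xs.takeWhile (· = x) with hrun
    have hrest : rest = xs.dropWhile (· = x) := rfl
    have hsplit : xs = run ++ rest := by
      rw [hrun, hrest]; exact (List.takeWhile_append_dropWhile).symm
    have hrep : run = List.replicate run.length x := takeWhile_eq_replicate x xs
    have hhead := dropWhile_head x xs
    rw [← hrest] at hhead
    by_cases hx : x = ""
    · subst hx
      have hhead' : rest = [] ∨ ∃ y ys, rest = y :: ys ∧ y ≠ "" := hhead
      rw [solve]
      simp only [← hrun, ← hrest]
      rw [show ("" :: xs) = (List.replicate (run.length + 1) "" ++ rest) by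
            rw [List.replicate_succ, hsplit]; simp [hrep.symm],
          go_replicate_empty, go_flush rest _ hhead', ih]
      simp
    · rw [solve]
      simp only [← hrun, ← hrest, if_neg hx]
      rw [show (x :: xs) = (List.replicate (run.length + 1) x ++ rest) by
            rw [List.replicate_succ, hsplit]; simp [hrep.symm],
          go_replicate_nonempty _ _ hx, ih]

-- ===== VERDICT =====
theorem solve_spec : Claim_equal_solve := by
  intro seq _
  unfold Spec_solve solve_alt
  exact solve_eq_go seq
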